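-- pv_equiv track=rewrite | github.com/jungyoonoh/AlgorithmPractice | Python/Programmers/KIT/BruteForce/모의고사.py | solution
-- ===== SOURCE A (Python) =====
-- def solution(answers):
--     loop = [[1,2,3,4,5], [2,1,2,3,2,4,2,5], [3,3,1,1,2,2,4,4,5,5]]
--     score = [[0,1],[0,2],[0,3]]
--     for i in range(len(answers)):
--         if answers[i] == loop[0][i%len(loop[0])]:
--             score[0][0] += 1
--         if answers[i] == loop[1][i%len(loop[1])]:
--             score[1][0] += 1
--         if answers[i] == loop[2][i%len(loop[2])]:
--             score[2][0] += 1
--     score.sort(reverse=True)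
--     answer = [score[0][1]]
--     if score[0][0] == score[1][0]: answer.append(score[1][1])
--     if score[0][0] == score[2][0]: answer.append(score[2][1])
--     answer.sort()
--     return answer
-- ===== SOURCE B (Python) =====
-- def solution(answers):
--     patterns = [[1, 2, 3, 4, 5], [2, 1, 2, 3, 2, 4, 2, 5], [3, 3, 1, 1, 2, 2, 4, 4, 5, 5]]
--     # All three patterns repeat with a period dividing 40, so an answer at position i
--     # can only help pattern p when p's value at residue i % 40 equals it.  Build a
--     # histogram of (position mod 40, answer) pairs once; each score is then 40 lookups.
--     keys = [(i % 40, a) for i, a in enumerate(answers)]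
--     tally = {}
--     for k in keys:
--         tally[k] = tally.get(k, 0) + 1
--     scores = [sum(tally.get((r, p[r % len(p)]), 0) for r in range(40)) for p in patterns]
--     winners, best = [], -1
--     for student, s in enumerate(scores, 1):
--         if s > best:
--             winners, best = [student], s
--         elif s == best:
--             winners.append(student)
--     return winners
-- ===== Notes on version B (the rewrite author's own statement) =====
-- stated objective: alternative
-- what changed: B never compares answers to patterns while scanning: it builds a histogram of (position mod 40, answer) pairs (40 = lcm of the pattern periods), computes each score by 40 dictionary lookups, and picks winners with a running-max accumulator instead of A's reverse lexicographic sort of [score,student] pairs plus explicit tie appends.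
import Mathlib
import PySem

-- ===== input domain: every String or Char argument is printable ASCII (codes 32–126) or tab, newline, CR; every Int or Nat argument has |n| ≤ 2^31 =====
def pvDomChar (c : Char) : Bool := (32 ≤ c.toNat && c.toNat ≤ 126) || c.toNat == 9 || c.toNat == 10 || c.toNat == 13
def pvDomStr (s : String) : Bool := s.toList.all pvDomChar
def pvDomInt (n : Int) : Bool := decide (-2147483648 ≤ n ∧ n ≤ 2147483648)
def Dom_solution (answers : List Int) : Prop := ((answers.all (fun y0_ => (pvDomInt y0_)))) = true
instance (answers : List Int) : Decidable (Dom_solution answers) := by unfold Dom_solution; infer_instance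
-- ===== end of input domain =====

-- B replaces A's per-element pattern comparisons and reverse sort: it builds a histogram of
-- (position mod 40, answer) pairs, scores each pattern by 40 dictionary lookups, and selects
-- the winners with a running-max accumulator; same return value.

-- ===== PORT A =====
def pvLoop0 : List Int := [1,2,3,4,5]
def pvLoop1 : List Int := [2,1,2,3,2,4,2,5]
def pvLoop2 : List Int := [3,3,1,1,2,2,4,4,5,5]

def solution (answers : List Int) : List Int :=
  -- for i in range(len(answers)): three independent 'if … : score[j][0] += 1' updates
  let s : Int × Int × Int :=
    (PySem.List.pyRange 0 answers.length 1).foldl (fun s i =>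
      let a := PySem.List.pyGetD answers i 0
      ((if a = PySem.List.pyGetD pvLoop0 (PySem.Int.mod i pvLoop0.length) 0 then s.1 + 1 else s.1),
       (if a = PySem.List.pyGetD pvLoop1 (PySem.Int.mod i pvLoop1.length) 0 then s.2.1 + 1 else s.2.1),
       (if a = PySem.List.pyGetD pvLoop2 (PySem.Int.mod i pvLoop2.length) 0 then s.2.2 + 1 else s.2.2)))
      (0, 0, 0)
  -- score.sort(reverse=True): lexicographic on the [score, student] pairs
  let score : List (Int × Int) :=
    PySem.List.sorted2 [(s.1, 1), (s.2.1, 2), (s.2.2, 3)] Prod.fst Prod.snd true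
  let answer : List Int := [(PySem.List.pyGetD score 0 (0, 0)).2]
  let answer := if (PySem.List.pyGetD score 0 (0, 0)).1 = (PySem.List.pyGetD score 1 (0, 0)).1
    then answer ++ [(PySem.List.pyGetD score 1 (0, 0)).2] else answer
  let answer := if (PySem.List.pyGetD score 0 (0, 0)).1 = (PySem.List.pyGetD score 2 (0, 0)).1
    then answer ++ [(PySem.List.pyGetD score 2 (0, 0)).2] else answer
  PySem.List.sorted answer (fun x => x) false

-- ===== PORT B =====
def solution_alt (answers : List Int) : List Int :=
  let patterns : List (List Int) := [pvLoop0, pvLoop1, pvLoop2]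
  -- keys = [(i % 40, a) for i, a in enumerate(answers)]
  let keys : List (Int × Int) :=
    (PySem.List.enumerate answers 0).map (fun ia => (PySem.Int.mod ia.1 40, ia.2))
  -- tally[k] = tally.get(k, 0) + 1
  let tally : PySem.Dict (Int × Int) Int :=
    keys.foldl (fun d k => d.insert k (d.getD k 0 + 1)) PySem.Dict.empty
  -- scores = [sum(tally.get((r, p[r % len(p)]), 0) for r in range(40)) for p in patterns]
  let scores : List Int := patterns.map (fun p =>
    ((PySem.List.pyRange 0 40 1).map (fun r =>
      tally.getD (r, PySem.List.pyGetD p (PySem.Int.mod r p.length) 0) 0)).sum)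
  -- running-max winner selection over enumerate(scores, 1)
  ((PySem.List.enumerate scores 1).foldl (fun st ss =>
      if st.2 < ss.2 then ([ss.1], ss.2)
      else if ss.2 = st.2 then (st.1 ++ [ss.1], st.2)
      else st) (([] : List Int), (-1 : Int))).1

-- ===== PRECONDITION & SPEC =====
def Spec_solution (answers : List Int) (out : List Int) : Prop := out = solution_alt answers
instance (answers : List Int) (out : List Int) : Decidable (Spec_solution answers out) := by unfold Spec_solution; infer_instance

-- ===== CLAIM (what is proved, stated in full; the proofs are below) =====
def Claim_equal_solution : Prop := ∀ (answers : List Int), Dom_solution answers → Spec_solution answers (solution answers)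

-- ===== LEMMAS AND PROOFS =====

-- A's triple-state fold splits into three independent counting folds
theorem foldl_triple (l : List Int) (c0 c1 c2 : Int → Prop) [DecidablePred c0] [DecidablePred c1] [DecidablePred c2] (a b c : Int) :
    l.foldl (fun s i =>
        ((if c0 i then s.1 + 1 else s.1), (if c1 i then s.2.1 + 1 else s.2.1), (if c2 i then s.2.2 + 1 else s.2.2))) (a, b, c)
      = (l.foldl (fun t i => if c0 i then t + 1 else t) a,
         l.foldl (fun t i => if c1 i then t + 1 else t) b,
         l.foldl (fun t i => if c2 i then t + 1 else t) c) := by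
  induction l generalizing a b c with
  | nil => rfl
  | cons x t ih => simp only [List.foldl]; rw [ih]

-- a counting fold is the corresponding 0/1 sum
theorem foldl_count (l : List Int) (c : Int → Prop) [DecidablePred c] (a : Int) :
    l.foldl (fun s i => if c i then s + 1 else s) a
      = a + (l.map (fun i => if c i then (1 : Int) else 0)).sum := by
  induction l generalizing a with
  | nil => simp
  | cons x t ih => by_cases h : c x <;> simp [List.foldl, h, ih] <;> ring

-- a map-sum where at most the element 'a' contributes, over a Nodup list containing 'a'
theorem sum_single (R : List Int) (hR : R.Nodup) (a : Int) (ha : a ∈ R) (f : Int → Int)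
    (hf : ∀ r, r ≠ a → f r = 0) : (R.map f).sum = f a := by
  induction R with
  | nil => cases ha
  | cons r R' ih =>
    rcases List.mem_cons.1 ha with h | h
    · subst h
      have : (R'.map f).sum = 0 := by
        apply List.sum_eq_zero; intro x hx
        rcases List.mem_map.1 hx with ⟨y, hy, rfl⟩
        exact hf y (fun e => (List.nodup_cons.1 hR).1 (e ▸ hy))
      simp [this]
    · have hne : r ≠ a := fun e => (List.nodup_cons.1 hR).1 (e ▸ h)
      simp [hf r hne, ih (List.nodup_cons.1 hR).2 h]

-- summing per-residue pair counts over all residues recounts the pair list itself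
theorem sum_count_pairs (R : List Int) (hR : R.Nodup) (v : Int → Int)
    (l : List (Int × Int)) (hl : ∀ k ∈ l, k.1 ∈ R) :
    (R.map (fun r => ((l.count (r, v r) : Nat) : Int))).sum
      = (l.map (fun k => if k.2 = v k.1 then (1 : Int) else 0)).sum := by
  induction l with
  | nil => simp
  | cons x t ih =>
    have hsplit :
        (R.map (fun r => (((x :: t).count (r, v r) : Nat) : Int))).sum
          = (R.map (fun r => ((t.count (r, v r) : Nat) : Int))).sum
            + (R.map (fun r => if (r, v r) = x then (1 : Int) else 0)).sum := by
      rw [← PySem.List.sum_map_add_int]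
      apply congrArg List.sum; apply List.map_congr_left; intro r _
      by_cases h : (r, v r) = x
      · simp [List.count_cons, h]
      · have h' : ¬ x = (r, v r) := fun e => h e.symm
        simp [List.count_cons, h, h']
    rw [hsplit, ih (fun k hk => hl k (List.mem_cons_of_mem _ hk))]
    have hx : (R.map (fun r => if (r, v r) = x then (1 : Int) else 0)).sum
        = if x.2 = v x.1 then (1 : Int) else 0 := by
      rw [sum_single R hR x.1 (hl x (List.mem_cons_self ..)) _
        (fun r hr => by simp [Prod.ext_iff]; intro e; exact absurd e hr)]
      cases x with
      | mk x1 x2 => simp [Prod.ext_iff, eq_comm]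
    rw [hx]; simp [add_comm]

-- the tally dictionary is the pair-count table
theorem tally_getD (keys : List (Int × Int)) (k : Int × Int) :
    (keys.foldl (fun d k => d.insert k (d.getD k 0 + 1)) PySem.Dict.empty).getD k 0
      = ((keys.count k : Nat) : Int) := by
  rw [PySem.Dict.getD_foldl_insert_add_one]
  simp [PySem.Dict.getD_empty]

-- residue reduction: the pattern value at i depends only on i mod 40 (periods divide 40)
theorem mod_mod40 (p : List Int) (hp : (p.length : Int) ∣ 40) (hpos : 0 < (p.length : Int)) (i : Int) :
    PySem.Int.mod (PySem.Int.mod i 40) (p.length : Int) = PySem.Int.mod i (p.length : Int) := by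
  rw [PySem.Int.mod_eq_emod_of_pos hpos, PySem.Int.mod_eq_emod_of_pos hpos,
      PySem.Int.mod_eq_emod_of_pos (show (0:Int) < 40 by norm_num)]
  exact Int.emod_emod_of_dvd i hp

-- B's per-pattern score equals A's 0/1 match sum over range(len(answers))
theorem score_eq (answers : List Int) (p : List Int)
    (hp : (p.length : Int) ∣ 40) (hpos : 0 < (p.length : Int)) :
    ((PySem.List.pyRange 0 40 1).map (fun r =>
        (((PySem.List.enumerate answers 0).map (fun ia => (PySem.Int.mod ia.1 40, ia.2))).foldl
            (fun d k => d.insert k (d.getD k 0 + 1)) PySem.Dict.empty).getD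
          (r, PySem.List.pyGetD p (PySem.Int.mod r p.length) 0) 0)).sum
      = ((PySem.List.pyRange 0 answers.length 1).map
          (fun i => if PySem.List.pyGetD answers i 0 = PySem.List.pyGetD p (PySem.Int.mod i p.length) 0
            then (1 : Int) else 0)).sum := by
  have h1 : ∀ r : Int, (((PySem.List.enumerate answers 0).map (fun ia => (PySem.Int.mod ia.1 40, ia.2))).foldl
        (fun d k => d.insert k (d.getD k 0 + 1)) PySem.Dict.empty).getD
          (r, PySem.List.pyGetD p (PySem.Int.mod r p.length) 0) 0
      = ((((PySem.List.enumerate answers 0).map (fun ia => (PySem.Int.mod ia.1 40, ia.2))).count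
          (r, PySem.List.pyGetD p (PySem.Int.mod r p.length) 0) : Nat) : Int) :=
    fun r => tally_getD _ _
  calc ((PySem.List.pyRange 0 40 1).map (fun r =>
        (((PySem.List.enumerate answers 0).map (fun ia => (PySem.Int.mod ia.1 40, ia.2))).foldl
            (fun d k => d.insert k (d.getD k 0 + 1)) PySem.Dict.empty).getD
          (r, PySem.List.pyGetD p (PySem.Int.mod r p.length) 0) 0)).sum
      = ((PySem.List.pyRange 0 40 1).map (fun r =>
          ((((PySem.List.enumerate answers 0).map (fun ia => (PySem.Int.mod ia.1 40, ia.2))).count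
            (r, PySem.List.pyGetD p (PySem.Int.mod r p.length) 0) : Nat) : Int))).sum := by
        apply congrArg List.sum; apply List.map_congr_left; intro r _; exact h1 r
    _ = (((PySem.List.enumerate answers 0).map (fun ia => (PySem.Int.mod ia.1 40, ia.2))).map
          (fun k => if k.2 = PySem.List.pyGetD p (PySem.Int.mod k.1 p.length) 0 then (1 : Int) else 0)).sum := by
        apply sum_count_pairs _ ?_ _ _ ?_
        · exact PySem.List.nodup_pyRange_one ..
        · intro k hk
          rcases List.mem_map.1 hk with ⟨ia, _, rfl⟩
          rw [PySem.List.mem_pyRange_one]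
          exact ⟨PySem.Int.mod_nonneg _ (by norm_num), PySem.Int.mod_lt _ (by norm_num)⟩
    _ = _ := by
        rw [PySem.List.enumerate_eq_map_pyRange (d := 0), List.map_map, List.map_map]
        apply congrArg List.sum; apply List.map_congr_left; intro i _
        simp only [Function.comp]
        rw [mod_mod40 p hp hpos]

-- proof-only helpers: the two post-scoring halves, as functions of the score triples
def aFinish (score : List (Int × Int)) : List Int :=
  let answer : List Int := [(PySem.List.pyGetD score 0 (0, 0)).2]
  let answer := if (PySem.List.pyGetD score 0 (0, 0)).1 = (PySem.List.pyGetD score 1 (0, 0)).1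
    then answer ++ [(PySem.List.pyGetD score 1 (0, 0)).2] else answer
  let answer := if (PySem.List.pyGetD score 0 (0, 0)).1 = (PySem.List.pyGetD score 2 (0, 0)).1
    then answer ++ [(PySem.List.pyGetD score 2 (0, 0)).2] else answer
  PySem.List.sorted answer (fun x => x) false

def bFinish (s0 s1 s2 : Int) : List Int :=
  ((PySem.List.enumerate [s0, s1, s2] 1).foldl (fun st ss =>
      if st.2 < ss.2 then ([ss.1], ss.2)
      else if ss.2 = st.2 then (st.1 ++ [ss.1], st.2)
      else st) (([] : List Int), (-1 : Int))).1

-- small evaluation lemmas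
theorem insertBy_nil {α : Type} (b : α → α → Bool) (x : α) :
    PySem.List.insertBy b x [] = [x] := rfl

theorem insertBy_cons {α : Type} (b : α → α → Bool) (x y : α) (ys : List α) :
    PySem.List.insertBy b x (y :: ys) = if b x y then x :: y :: ys else y :: PySem.List.insertBy b x ys := rfl

-- Python's reverse lexicographic sort of the three [score, student] pairs, in closed form
theorem sorted2_three (s0 s1 s2 : Int) :
    PySem.List.sorted2 [(s0, (1 : Int)), (s1, 2), (s2, 3)] Prod.fst Prod.snd true =
      if s1 < s0 then
        if s2 < s0 then
          if s2 < s1 then [(s0, 1), (s1, 2), (s2, 3)] else [(s0, 1), (s2, 3), (s1, 2)]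
        else [(s2, 3), (s0, 1), (s1, 2)]
      else
        if s2 < s1 then
          if s2 < s0 then [(s1, 2), (s0, 1), (s2, 3)] else [(s1, 2), (s2, 3), (s0, 1)]
        else [(s2, 3), (s1, 2), (s0, 1)] := by
  simp only [PySem.List.sorted2, List.foldl, insertBy_nil, insertBy_cons]
  split_ifs <;> (try simp_all [insertBy_cons, insertBy_nil]) <;> (try omega) <;>
  (try split_ifs) <;> (try simp_all) <;> (try omega)

-- B's running-max winner fold, in closed form (scores are nonnegative)
theorem bFinish_closed (s0 s1 s2 : Int) (h0 : 0 ≤ s0) :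
    bFinish s0 s1 s2 =
      if s0 < s1 then
        (if s1 < s2 then [3] else if s2 = s1 then [2, 3] else [2])
      else if s1 = s0 then
        (if s0 < s2 then [3] else if s2 = s0 then [1, 2, 3] else [1, 2])
      else
        (if s0 < s2 then [3] else if s2 = s0 then [1, 3] else [1]) := by
  have hfirst : (-1 : Int) < s0 := by omega
  simp only [bFinish, PySem.List.enumerate, List.foldl]
  split_ifs <;> simp_all

-- the post-scoring halves agree for arbitrary nonnegative score triples
set_option maxHeartbeats 2000000 in
theorem finish_eq (s0 s1 s2 : Int) (h0 : 0 ≤ s0) :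
    aFinish (PySem.List.sorted2 [(s0, (1 : Int)), (s1, 2), (s2, 3)] Prod.fst Prod.snd true)
      = bFinish s0 s1 s2 := by
  rw [sorted2_three, bFinish_closed s0 s1 s2 h0]
  simp only [aFinish]
  split_ifs <;>
  (try simp_all [PySem.List.pyGetD, PySem.List.pyIdx?, PySem.List.sorted]) <;>
  (try omega) <;> (try decide)

-- each 0/1 match sum is nonnegative
theorem matchsum_nonneg (answers p : List Int) :
    0 ≤ ((PySem.List.pyRange 0 answers.length 1).map
        (fun i => if PySem.List.pyGetD answers i 0 = PySem.List.pyGetD p (PySem.Int.mod i p.length) 0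
          then (1 : Int) else 0)).sum := by
  apply List.sum_nonneg; intro x hx
  rcases List.mem_map.1 hx with ⟨i, _, rfl⟩
  split_ifs <;> norm_num

theorem solution_eq (answers : List Int) : solution answers = solution_alt answers := by
  simp only [solution, solution_alt, foldl_triple, List.map]
  rw [foldl_count, foldl_count, foldl_count,
      score_eq answers pvLoop0 (by decide) (by decide),
      score_eq answers pvLoop1 (by decide) (by decide),
      score_eq answers pvLoop2 (by decide) (by decide)]
  simp only [zero_add]
  have h0 := matchsum_nonneg answers pvLoop0
  show aFinish _ = bFinish _ _ _
  exact finish_eq _ _ _ h0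

-- ===== VERDICT (by name: the statement is the Claim_ definition above) =====
theorem solution_spec : Claim_equal_solution := by
  intro answers _
  unfold Spec_solution
  exact solution_eq answers
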